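-- pv_equiv track=rewrite | github.com/ronjian/Python-Practise | codility/max_depth.py | solution
-- ===== SOURCE A (Python) =====
-- def solution(A):
--     # write your code in Python 2.7
--     n = len(A)
--     l = []
--     for Q in range(1, n-1):
--         P_d = {}
--         Q_d = {}
--         for P in range(0, Q ):
--             if A[P] - A[Q] > 0 :
--                 P_d[str(P)+","+str(Q)] = A[P] - A[Q]
--         for R in range(Q+1 , n):
--             if A[R] - A[Q] > 0 :
--                 Q_d[str(Q)+","+str(R)] = A[R] - A[Q]
--         if len(P_d)>0 and len(Q_d)>0 :
--             l.append(min(max(P_d.values()) , max(Q_d.values())))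
--     if len(l) > 0 :
--         return(max(l))
--     else :
--         return -1
-- ===== SOURCE B (Python) =====
-- def solution(A):
--     n = len(A)
--     if n < 3:
--         return -1
--     # prefix maxima: pref[i] = max(A[0..i])
--     pref = []
--     m = A[0]
--     for x in A:
--         m = max(m, x)
--         pref.append(m)
--     # suffix maxima (built over reversed A, then reversed): suf[i] = max(A[i..n-1])
--     suf = []
--     m = A[-1]
--     for x in reversed(A):
--         m = max(m, x)
--         suf.append(m)
--     suf.reverse()
--     best = -1
--     for Q in range(1, n - 1):
--         d = min(pref[Q - 1], suf[Q + 1]) - A[Q]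
--         if d > 0:
--             best = max(best, d)
--     return best
-- ===== Notes on version B (the rewrite author's own statement) =====
-- stated objective: faster
-- what changed: Replaces A's per-Q rebuilding of two dictionaries of all positive left/right drops (scanning the whole array for every Q) by one prefix-max sweep, one suffix-max sweep and a single pass over Q using min(prefmax,sufmax)-A[Q].
import Mathlib
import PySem

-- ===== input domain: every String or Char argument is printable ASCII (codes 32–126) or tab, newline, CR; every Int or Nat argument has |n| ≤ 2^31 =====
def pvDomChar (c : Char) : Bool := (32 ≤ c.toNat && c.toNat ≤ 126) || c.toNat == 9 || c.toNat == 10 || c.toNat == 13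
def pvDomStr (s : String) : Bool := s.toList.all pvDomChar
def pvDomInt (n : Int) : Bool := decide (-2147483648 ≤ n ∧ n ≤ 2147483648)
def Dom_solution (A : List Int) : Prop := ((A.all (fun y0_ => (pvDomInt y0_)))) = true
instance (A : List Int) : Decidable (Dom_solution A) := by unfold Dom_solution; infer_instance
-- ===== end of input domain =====

-- B replaces A's per-Q dictionary scans by one prefix-max and one suffix-max sweep and a
-- single pass over Q (same return value; measurably faster).

-- ===== PORT A =====
-- inner P-loop of A: builds the dict P_d of positive left drops for a fixed Q
def pvDropsL (A : List Int) (Q : Int) : PySem.Dict String Int :=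
  (PySem.List.pyRange 0 Q).foldl (fun d P =>
    if PySem.List.pyGetD A P 0 - PySem.List.pyGetD A Q 0 > 0 then
      d.insert (PySem.Int.toStr P ++ "," ++ PySem.Int.toStr Q)
        (PySem.List.pyGetD A P 0 - PySem.List.pyGetD A Q 0)
    else d) PySem.Dict.empty

-- inner R-loop of A: builds the dict Q_d of positive right drops for a fixed Q
def pvDropsR (A : List Int) (Q : Int) : PySem.Dict String Int :=
  (PySem.List.pyRange (Q+1) (PySem.List.len A)).foldl (fun d R =>
    if PySem.List.pyGetD A R 0 - PySem.List.pyGetD A Q 0 > 0 then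
      d.insert (PySem.Int.toStr Q ++ "," ++ PySem.Int.toStr R)
        (PySem.List.pyGetD A R 0 - PySem.List.pyGetD A Q 0)
    else d) PySem.Dict.empty

def solution (A : List Int) : Int :=
  let n := PySem.List.len A
  let l := (PySem.List.pyRange 1 (n-1)).foldl (fun l Q =>
    let Pd := pvDropsL A Q
    let Qd := pvDropsR A Q
    if Pd.size > 0 ∧ Qd.size > 0 then
      l ++ [min ((PySem.List.max? Pd.values (fun x => x)).getD 0)
                ((PySem.List.max? Qd.values (fun x => x)).getD 0)]
    else l) []
  if l.length > 0 then (PySem.List.max? l (fun x => x)).getD 0 else -1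

-- ===== PORT B =====
-- the running-max append loop of B (used for pref, and over the reversed list for suf)
def pvScanMax (m : Int) : List Int → List Int
  | [] => []
  | x :: t => max m x :: pvScanMax (max m x) t

def solution_alt (A : List Int) : Int :=
  let n := PySem.List.len A
  if n < 3 then -1
  else
    let pref := pvScanMax (PySem.List.pyGetD A 0 0) A
    let suf := (pvScanMax (PySem.List.pyGetD A (-1) 0) A.reverse).reverse
    (PySem.List.pyRange 1 (n-1)).foldl (fun best Q =>
      let d := min (PySem.List.pyGetD pref (Q-1) 0) (PySem.List.pyGetD suf (Q+1) 0)
                 - PySem.List.pyGetD A Q 0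
      if d > 0 then max best d else best) (-1)

-- ===== PRECONDITION & SPEC =====
def Spec_solution (A : List Int) (out : Int) : Prop := out = solution_alt A
instance (A : List Int) (out : Int) : Decidable (Spec_solution A out) := by unfold Spec_solution; infer_instance

-- ===== CLAIM (what is proved, stated in full; the proofs are below) =====
def Claim_equal_solution : Prop := ∀ (A : List Int), Dom_solution A → Spec_solution A (solution A)

-- ===== LEMMAS AND PROOFS =====

/-- max of a nonempty list, as Python's `max` computes it. -/
def pvMx : List Int → Int
  | [] => 0
  | x :: t => t.foldl max x

lemma pvMx_isMax {l : List Int} : ∀ y ∈ l, y ≤ pvMx l := by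
  intro y hy
  cases l with
  | nil => cases hy
  | cons x t =>
    rcases List.mem_cons.mp hy with rfl | hy'
    · exact (PySem.List.le_foldl_max t y).1
    · exact (PySem.List.le_foldl_max t x).2 y hy'

lemma pvMx_mem {l : List Int} (h : l ≠ []) : pvMx l ∈ l := by
  cases l with
  | nil => exact absurd rfl h
  | cons x t =>
    rcases PySem.List.foldl_max_mem t x with h' | h'
    · simp [pvMx, h']
    · simp [pvMx]; right; exact h'

lemma pv_foldl_max_of_mem {a : Int} {l : List Int} (h : a ∈ l) : l.foldl max a = pvMx l := by
  have h1 : l.foldl max a = a ∨ l.foldl max a ∈ l := PySem.List.foldl_max_mem l a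
  have hmem : l.foldl max a ∈ l := by
    rcases h1 with h1 | h1
    · rw [h1]; exact h
    · exact h1
  have hne : l ≠ [] := by rintro rfl; cases h
  apply le_antisymm
  · exact pvMx_isMax _ hmem
  · have h2 := (PySem.List.le_foldl_max l a).2
    rcases (pvMx_mem hne) with hm
    exact h2 _ hm

-- ---- str(int) is injective on nonnegative ints ----

/-- decimal decode, proof-side only -/
def pvVal (cs : List Char) : Nat := cs.foldl (fun a c => 10 * a + (c.toNat - 48)) 0

lemma pv_toDigitsCore_acc : ∀ (fuel n : Nat) (ds : List Char),
    Nat.toDigitsCore 10 fuel n ds = Nat.toDigitsCore 10 fuel n [] ++ ds := by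
  intro fuel
  induction fuel with
  | zero => intro n ds; simp [Nat.toDigitsCore]
  | succ f ih =>
    intro n ds
    simp only [Nat.toDigitsCore]
    by_cases h : n / 10 = 0
    · simp [h]
    · simp only [h, if_false]
      rw [ih (n / 10) ((n % 10).digitChar :: ds), ih (n / 10) [(n % 10).digitChar]]
      simp

lemma pv_digitChar_val {m : Nat} (h : m < 10) : (Nat.digitChar m).toNat - 48 = m := by
  interval_cases m <;> decide

lemma pvVal_append_singleton (l : List Char) (c : Char) :
    pvVal (l ++ [c]) = 10 * pvVal l + (c.toNat - 48) := by
  simp [pvVal, List.foldl_append]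

lemma pv_val_toDigitsCore : ∀ (fuel n : Nat), n < 10 ^ fuel →
    pvVal (Nat.toDigitsCore 10 fuel n []) = n := by
  intro fuel
  induction fuel with
  | zero => intro n h; interval_cases n; simp [Nat.toDigitsCore, pvVal]
  | succ f ih =>
    intro n h
    simp only [Nat.toDigitsCore]
    by_cases h0 : n / 10 = 0
    · have hn : n < 10 := by omega
      simp [h0, pvVal, pv_digitChar_val hn, Nat.mod_eq_of_lt hn]
    · simp only [h0, if_false]
      rw [pv_toDigitsCore_acc, pvVal_append_singleton]
      rw [ih (n / 10) (by rw [pow_succ] at h; omega)]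
      rw [pv_digitChar_val (Nat.mod_lt _ (by omega))]
      omega

lemma pv_toDigits_inj {a b : Nat} (h : Nat.toDigits 10 a = Nat.toDigits 10 b) : a = b := by
  have ha : pvVal (Nat.toDigits 10 a) = a := by
    have := pv_val_toDigitsCore (a + 1) a (by
      calc a < 10 ^ a := Nat.lt_pow_self (by omega)
        _ ≤ 10 ^ (a + 1) := Nat.pow_le_pow_right (by omega) (by omega))
    simpa [Nat.toDigits] using this
  have hb : pvVal (Nat.toDigits 10 b) = b := by
    have := pv_val_toDigitsCore (b + 1) b (by
      calc b < 10 ^ b := Nat.lt_pow_self (by omega)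
        _ ≤ 10 ^ (b + 1) := Nat.pow_le_pow_right (by omega) (by omega))
    simpa [Nat.toDigits] using this
  rw [← ha, ← hb, h]

lemma pv_toChars_inj {a b : Int} (ha : 0 ≤ a) (hb : 0 ≤ b)
    (h : PySem.Int.toChars a = PySem.Int.toChars b) : a = b := by
  simp only [PySem.Int.toChars, if_neg (by omega : ¬ a < 0), if_neg (by omega : ¬ b < 0)] at h
  have := pv_toDigits_inj h
  omega

lemma pv_keyL_inj (Q : Int) {P P' : Int} (hP : 0 ≤ P) (hP' : 0 ≤ P')
    (h : PySem.Int.toStr P ++ "," ++ PySem.Int.toStr Q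
       = PySem.Int.toStr P' ++ "," ++ PySem.Int.toStr Q) : P = P' := by
  have h' := congrArg String.toList h
  simp only [String.toList_append, PySem.Int.toList_toStr] at h'
  rw [List.append_assoc, List.append_assoc] at h'
  have := List.append_cancel_right h'
  exact pv_toChars_inj hP hP' this

lemma pv_keyR_inj (Q : Int) {R R' : Int} (hR : 0 ≤ R) (hR' : 0 ≤ R')
    (h : PySem.Int.toStr Q ++ "," ++ PySem.Int.toStr R
       = PySem.Int.toStr Q ++ "," ++ PySem.Int.toStr R') : R = R' := by
  have h' := congrArg String.toList h
  simp only [String.toList_append, PySem.Int.toList_toStr] at h'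
  rw [List.append_assoc, List.append_assoc] at h'
  have := List.append_cancel_left (List.append_cancel_left h')
  exact pv_toChars_inj hR hR' this

-- conditional-insert loop = insert loop over the filtered list
lemma pv_foldl_condinsert {κ : Type} [BEq κ] (p : Int → Prop) [DecidablePred p]
    (k : Int → κ) (v : Int → Int) :
    ∀ (l : List Int) (d : PySem.Dict κ Int),
      l.foldl (fun d P => if p P then d.insert (k P) (v P) else d) d
        = (l.filter (fun P => decide (p P))).foldl (fun d P => d.insert (k P) (v P)) d := by
  intro l
  induction l with
  | nil => intro d; simp
  | cons x t ih =>
    intro d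
    by_cases h : p x <;> simp [h, ih]

lemma pv_dropsL_items (A : List Int) (Q : Int) :
    (pvDropsL A Q).items = ((PySem.List.pyRange 0 Q).filter
        (fun P => decide (PySem.List.pyGetD A P 0 - PySem.List.pyGetD A Q 0 > 0))).map
        (fun P => (PySem.Int.toStr P ++ "," ++ PySem.Int.toStr Q,
                   PySem.List.pyGetD A P 0 - PySem.List.pyGetD A Q 0)) := by
  unfold pvDropsL
  rw [pv_foldl_condinsert]
  rw [PySem.Dict.items_foldl_insert_fresh _ _ _ _
    (fun a _ => PySem.Dict.contains_empty _)
    (by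
      apply List.Nodup.map_on
      · intro x hx y hy hxy
        have hx0 : 0 ≤ x := (PySem.List.mem_pyRange_one.mp (List.mem_of_mem_filter hx)).1
        have hy0 : 0 ≤ y := (PySem.List.mem_pyRange_one.mp (List.mem_of_mem_filter hy)).1
        exact pv_keyL_inj Q hx0 hy0 hxy
      · exact (PySem.List.nodup_pyRange_one 0 Q).filter _)]
  rfl

lemma pv_dropsR_items (A : List Int) (Q : Int) (hQ : 0 ≤ Q) :
    (pvDropsR A Q).items = ((PySem.List.pyRange (Q+1) (PySem.List.len A)).filter
        (fun R => decide (PySem.List.pyGetD A R 0 - PySem.List.pyGetD A Q 0 > 0))).map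
        (fun R => (PySem.Int.toStr Q ++ "," ++ PySem.Int.toStr R,
                   PySem.List.pyGetD A R 0 - PySem.List.pyGetD A Q 0)) := by
  unfold pvDropsR
  rw [pv_foldl_condinsert]
  rw [PySem.Dict.items_foldl_insert_fresh _ _ _ _
    (fun a _ => PySem.Dict.contains_empty _)
    (by
      apply List.Nodup.map_on
      · intro x hx y hy hxy
        have hx0 : Q + 1 <= x := (PySem.List.mem_pyRange_one.mp (List.mem_of_mem_filter hx)).1
        have hy0 : Q + 1 <= y := (PySem.List.mem_pyRange_one.mp (List.mem_of_mem_filter hy)).1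
        exact pv_keyR_inj Q (by omega) (by omega) hxy
      · exact (PySem.List.nodup_pyRange_one _ _).filter _)]
  rfl

lemma pv_dropsL_values (A : List Int) (Q : Int) :
    (pvDropsL A Q).values = ((PySem.List.pyRange 0 Q).filter
        (fun P => decide (PySem.List.pyGetD A P 0 - PySem.List.pyGetD A Q 0 > 0))).map
        (fun P => PySem.List.pyGetD A P 0 - PySem.List.pyGetD A Q 0) := by
  show (pvDropsL A Q).items.map (fun p => p.2) = _
  rw [pv_dropsL_items, List.map_map]
  rfl

lemma pv_dropsL_size (A : List Int) (Q : Int) :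
    (pvDropsL A Q).size = ((PySem.List.pyRange 0 Q).filter
        (fun P => decide (PySem.List.pyGetD A P 0 - PySem.List.pyGetD A Q 0 > 0))).length := by
  show (pvDropsL A Q).items.length = _
  rw [pv_dropsL_items, List.length_map]

lemma pv_dropsR_values (A : List Int) (Q : Int) (hQ : 0 ≤ Q) :
    (pvDropsR A Q).values = ((PySem.List.pyRange (Q+1) (PySem.List.len A)).filter
        (fun R => decide (PySem.List.pyGetD A R 0 - PySem.List.pyGetD A Q 0 > 0))).map
        (fun R => PySem.List.pyGetD A R 0 - PySem.List.pyGetD A Q 0) := by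
  show (pvDropsR A Q).items.map (fun p => p.2) = _
  rw [pv_dropsR_items A Q hQ, List.map_map]
  rfl

lemma pv_dropsR_size (A : List Int) (Q : Int) (hQ : 0 ≤ Q) :
    (pvDropsR A Q).size = ((PySem.List.pyRange (Q+1) (PySem.List.len A)).filter
        (fun R => decide (PySem.List.pyGetD A R 0 - PySem.List.pyGetD A Q 0 > 0))).length := by
  show (pvDropsR A Q).items.length = _
  rw [pv_dropsR_items A Q hQ, List.length_map]


-- ---- filter/max characterization ----

lemma pv_filter_nil_iff (ws : List Int) (c : Int) (hne : ws ≠ []) :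
    (ws.filter (fun x => decide (x - c > 0))) = [] ↔ pvMx ws ≤ c := by
  rw [List.filter_eq_nil_iff]
  constructor
  · intro h
    have := h (pvMx ws) (pvMx_mem hne)
    simp at this; omega
  · intro h x hx
    have := pvMx_isMax x hx
    simp; omega

lemma pv_maxfilter (ws : List Int) (c : Int) (hne : ws ≠ []) (h : c < pvMx ws) :
    (PySem.List.max? ((ws.filter (fun x => decide (x - c > 0))).map (fun x => x - c))
      (fun x => x)).getD 0 = pvMx ws - c := by
  set L := (ws.filter (fun x => decide (x - c > 0))).map (fun x => x - c) with hL
  have hmemL : pvMx ws - c ∈ L := by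
    rw [hL]
    exact List.mem_map.mpr ⟨pvMx ws, List.mem_filter.mpr ⟨pvMx_mem hne, by simp; omega⟩, rfl⟩
  cases hM : PySem.List.max? L (fun x => x) with
  | none =>
    rw [PySem.List.max?_eq_none_iff] at hM
    rw [hM] at hmemL; cases hmemL
  | some m =>
    have h1 : m ∈ L := PySem.List.max?_mem hM
    have h2 : pvMx ws - c ≤ m := PySem.List.max?_isMax hM _ hmemL
    have h3 : m ≤ pvMx ws - c := by
      rw [hL] at h1
      rcases List.mem_map.mp h1 with ⟨x, hx, rfl⟩
      have := pvMx_isMax x (List.mem_of_mem_filter hx)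
      omega
    simp; omega

-- ---- index bookkeeping ----

lemma pv_map_pyRange_take (A : List Int) (Q : Int) (h0 : 0 ≤ Q) (h1 : Q ≤ (A.length : Int)) :
    (PySem.List.pyRange 0 Q).map (fun j => PySem.List.pyGetD A j 0) = A.take Q.toNat := by
  obtain ⟨m, rfl⟩ : ∃ m : Nat, Q = (m : Int) := ⟨Q.toNat, by omega⟩
  rw [PySem.List.pyRange_zero_natCast, List.map_map]
  apply List.ext_getElem
  · simp; omega
  · intro i hi1 hi2
    simp only [List.getElem_map, List.getElem_range, Function.comp_apply, List.getElem_take]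
    rw [PySem.List.pyGetD_eq_getElem A 0 (by omega) (by simp at hi1 ⊢; omega)]
    simp

lemma pv_map_pyRange_drop (A : List Int) (Q : Int) (h0 : 0 ≤ Q) :
    (PySem.List.pyRange (Q+1) (PySem.List.len A)).map (fun j => PySem.List.pyGetD A j 0)
      = A.drop (Q.toNat + 1) := by
  rw [PySem.List.map_pyGetD_pyRange A 0 (by omega : 0 ≤ Q + 1)]
  congr 1
  omega

-- ---- the scan lists of B ----

lemma pv_scanMax_length (m : Int) (xs : List Int) : (pvScanMax m xs).length = xs.length := by
  induction xs generalizing m with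
  | nil => simp [pvScanMax]
  | cons x t ih => simp [pvScanMax, ih]

lemma pv_scanMax_getD (xs : List Int) : ∀ (m : Int) (i : Nat), i < xs.length →
    (pvScanMax m xs).getD i 0 = (xs.take (i+1)).foldl max m := by
  induction xs with
  | nil => intro m i h; simp at h
  | cons x t ih =>
    intro m i h
    cases i with
    | zero => simp [pvScanMax]
    | succ j =>
      simp only [pvScanMax, List.getD_cons_succ, List.take_succ_cons, List.foldl_cons]
      exact ih (max m x) j (by simpa using h)

lemma pv_last (A : List Int) (h : A ≠ []) :
    PySem.List.pyGetD A (-1) 0 = A.getD (A.length - 1) 0 := by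
  have hl : 0 < A.length := List.length_pos_iff.mpr h
  simp only [PySem.List.pyGetD, PySem.List.pyGet?, PySem.List.pyIdx?]
  rw [if_neg (by omega), if_pos (by omega)]
  simp [List.getD]

lemma pv_pref_at (A : List Int) (Q : Int) (h1 : 1 ≤ Q) (h2 : Q ≤ (A.length : Int)) :
    PySem.List.pyGetD (pvScanMax (PySem.List.pyGetD A 0 0) A) (Q-1) 0
      = pvMx (A.take Q.toNat) := by
  have hlen : 0 < A.length := by omega
  rw [PySem.List.pyGetD_of_nonneg _ _ (by omega)]
  rw [pv_scanMax_getD A _ (Q-1).toNat (by omega)]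
  have he : (Q-1).toNat + 1 = Q.toNat := by omega
  rw [he]
  have h0 : PySem.List.pyGetD A 0 0 = A.getD 0 0 := by
    rw [PySem.List.pyGetD_of_nonneg _ _ (by omega)]
    simp
  rw [h0]
  cases A with
  | nil => simp at hlen
  | cons a t =>
    simp only [List.getD_cons_zero]
    apply pv_foldl_max_of_mem
    have : Q.toNat = (Q.toNat - 1) + 1 := by omega
    rw [this, List.take_succ_cons]
    exact List.mem_cons_self

lemma pv_suf_at (A : List Int) (Q : Int) (h1 : 0 ≤ Q) (h2 : Q + 1 < (A.length : Int)) :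
    PySem.List.pyGetD ((pvScanMax (PySem.List.pyGetD A (-1) 0) A.reverse).reverse) (Q+1) 0
      = pvMx (A.drop (Q.toNat + 1)) := by
  have hlen : 0 < A.length := by omega
  have hne : A ≠ [] := List.ne_nil_of_length_pos hlen
  set j : Nat := (Q+1).toNat with hj
  have hjn : j < A.length := by omega
  rw [PySem.List.pyGetD_of_nonneg _ _ (by omega)]
  have hlenr : ((pvScanMax (PySem.List.pyGetD A (-1) 0) A.reverse).reverse).length = A.length := by
    simp [pv_scanMax_length]
  -- getD on the reverse
  have hrev : ((pvScanMax (PySem.List.pyGetD A (-1) 0) A.reverse).reverse).getD j 0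
      = (pvScanMax (PySem.List.pyGetD A (-1) 0) A.reverse).getD (A.length - 1 - j) 0 := by
    rw [List.getD_eq_getElem _ _ (by simp [pv_scanMax_length]; omega),
        List.getD_eq_getElem _ _ (by simp [pv_scanMax_length]; omega)]
    rw [List.getElem_reverse]
    congr 1
    simp [pv_scanMax_length]
  rw [hrev]
  rw [pv_scanMax_getD A.reverse _ (A.length - 1 - j) (by simp; omega)]
  have htk : A.length - 1 - j + 1 = A.length - j := by omega
  rw [htk]
  have hdr : A.reverse.take (A.length - j) = (A.drop j).reverse := by
    rw [List.reverse_drop]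
  rw [hdr]
  rw [(List.reverse_perm (A.drop j)).foldl_eq]
  rw [pv_last A hne]
  have hmem : A.getD (A.length - 1) 0 ∈ A.drop j := by
    rw [List.getD_eq_getElem _ _ (by omega)]
    have hg : (A.drop j)[A.length - 1 - j]'(by simp; omega) = A[A.length - 1]'(by omega) := by
      rw [List.getElem_drop]
      congr 1
      omega
    rw [← hg]
    exact List.getElem_mem _
  have hje : j = Q.toNat + 1 := by omega
  rw [pv_foldl_max_of_mem hmem, hje]

-- ---- loop shapes ----

lemma pv_foldl_append_if' (p : Int → Prop) [DecidablePred p] (f : Int → Int)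
    (l : List Int) (acc : List Int) :
    l.foldl (fun acc x => if p x then acc ++ [f x] else acc) acc
      = acc ++ (l.filter (fun x => decide (p x))).map f := by
  have := PySem.List.foldl_append_if (fun x => decide (p x)) f l acc
  simpa using this

lemma pv_foldl_if_max (p : Int → Prop) [DecidablePred p] (f : Int → Int) :
    ∀ (l : List Int) (c : Int),
      l.foldl (fun b Q => if p Q then max b (f Q) else b) c
        = ((l.filter (fun Q => decide (p Q))).map f).foldl max c := by
  intro l
  induction l with
  | nil => intro c; simp
  | cons x t ih =>
    intro c
    by_cases h : p x <;> simp [h, ih]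

lemma pv_final (L : List Int) (hpos : ∀ x ∈ L, 0 < x) :
    (if L.length > 0 then (PySem.List.max? L (fun x => x)).getD 0 else (-1:Int))
      = L.foldl max (-1) := by
  cases L with
  | nil => simp
  | cons x t =>
    have hx : (0:Int) < x := hpos x List.mem_cons_self
    rw [if_pos (by simp)]
    rw [PySem.List.max?_id_cons]
    simp only [Option.getD_some, List.foldl_cons]
    have : max (-1:Int) x = x := max_eq_right (by omega)
    rw [this]


-- ---- the per-Q bridge between A's dicts and B's scans ----

lemma pv_perQ (A : List Int) (Q : Int) (h1 : 1 ≤ Q) (h2 : Q < (A.length : Int) - 1) :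
    (((pvDropsL A Q).size > 0 ∧ (pvDropsR A Q).size > 0) ↔
      0 < min (PySem.List.pyGetD (pvScanMax (PySem.List.pyGetD A 0 0) A) (Q-1) 0)
              (PySem.List.pyGetD ((pvScanMax (PySem.List.pyGetD A (-1) 0) A.reverse).reverse) (Q+1) 0)
            - PySem.List.pyGetD A Q 0)
    ∧ (((pvDropsL A Q).size > 0 ∧ (pvDropsR A Q).size > 0) →
        min ((PySem.List.max? (pvDropsL A Q).values (fun x => x)).getD 0)
            ((PySem.List.max? (pvDropsR A Q).values (fun x => x)).getD 0)
          = min (PySem.List.pyGetD (pvScanMax (PySem.List.pyGetD A 0 0) A) (Q-1) 0)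
                (PySem.List.pyGetD ((pvScanMax (PySem.List.pyGetD A (-1) 0) A.reverse).reverse) (Q+1) 0)
              - PySem.List.pyGetD A Q 0) := by
  set c := PySem.List.pyGetD A Q 0 with hc
  -- the two windows
  have hwsL : (PySem.List.pyRange 0 Q).map (fun j => PySem.List.pyGetD A j 0)
      = A.take Q.toNat := pv_map_pyRange_take A Q (by omega) (by omega)
  have hwsR : (PySem.List.pyRange (Q+1) (PySem.List.len A)).map (fun j => PySem.List.pyGetD A j 0)
      = A.drop (Q.toNat + 1) := pv_map_pyRange_drop A Q (by omega)
  have hneL : A.take Q.toNat ≠ [] := by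
    apply List.ne_nil_of_length_pos
    simp; omega
  have hneR : A.drop (Q.toNat + 1) ≠ [] := by
    apply List.ne_nil_of_length_pos
    simp; omega
  -- A-side filtered lists, rewritten over the windows
  have hfL : ((PySem.List.pyRange 0 Q).filter
        (fun P => decide (PySem.List.pyGetD A P 0 - c > 0))).map
        (fun P => PySem.List.pyGetD A P 0 - c)
      = ((A.take Q.toNat).filter (fun x => decide (x - c > 0))).map (fun x => x - c) := by
    rw [← hwsL, List.filter_map, List.map_map]
    rfl
  have hfR : ((PySem.List.pyRange (Q+1) (PySem.List.len A)).filter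
        (fun R => decide (PySem.List.pyGetD A R 0 - c > 0))).map
        (fun R => PySem.List.pyGetD A R 0 - c)
      = ((A.drop (Q.toNat + 1)).filter (fun x => decide (x - c > 0))).map (fun x => x - c) := by
    rw [← hwsR, List.filter_map, List.map_map]
    rfl
  have hlL : ((PySem.List.pyRange 0 Q).filter
        (fun P => decide (PySem.List.pyGetD A P 0 - c > 0))).length
      = ((A.take Q.toNat).filter (fun x => decide (x - c > 0))).length := by
    have := congrArg List.length hfL
    simpa using this
  have hlR : ((PySem.List.pyRange (Q+1) (PySem.List.len A)).filter
        (fun R => decide (PySem.List.pyGetD A R 0 - c > 0))).length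
      = ((A.drop (Q.toNat + 1)).filter (fun x => decide (x - c > 0))).length := by
    have := congrArg List.length hfR
    simpa using this
  -- B-side values
  have hpref := pv_pref_at A Q h1 (by omega)
  have hsuf := pv_suf_at A Q (by omega) (by omega)
  rw [hpref, hsuf]
  -- size conditions
  have hszL : ((pvDropsL A Q).size > 0) ↔ c < pvMx (A.take Q.toNat) := by
    rw [pv_dropsL_size, hlL]
    rw [gt_iff_lt, List.length_pos_iff]
    constructor
    · intro h
      by_contra hcon
      exact h ((pv_filter_nil_iff _ c hneL).mpr (by omega))
    · intro h hcon
      have := (pv_filter_nil_iff _ c hneL).mp hcon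
      omega
  have hszR : ((pvDropsR A Q).size > 0) ↔ c < pvMx (A.drop (Q.toNat + 1)) := by
    rw [pv_dropsR_size A Q (by omega), hlR]
    rw [gt_iff_lt, List.length_pos_iff]
    constructor
    · intro h
      by_contra hcon
      exact h ((pv_filter_nil_iff _ c hneR).mpr (by omega))
    · intro h hcon
      have := (pv_filter_nil_iff _ c hneR).mp hcon
      omega
  constructor
  · rw [hszL, hszR]
    rcases le_total (pvMx (A.take Q.toNat)) (pvMx (A.drop (Q.toNat + 1))) with h | h
    · rw [min_eq_left h]; constructor <;> intro hh <;> [omega; exact ⟨by omega, by omega⟩]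
    · rw [min_eq_right h]; constructor <;> intro hh <;> [omega; exact ⟨by omega, by omega⟩]
  · rintro ⟨hL, hR⟩
    have hcl : c < pvMx (A.take Q.toNat) := hszL.mp hL
    have hcr : c < pvMx (A.drop (Q.toNat + 1)) := hszR.mp hR
    rw [pv_dropsL_values, hfL, pv_maxfilter _ c hneL hcl]
    rw [pv_dropsR_values A Q (by omega), hfR, pv_maxfilter _ c hneR hcr]
    rcases le_total (pvMx (A.take Q.toNat)) (pvMx (A.drop (Q.toNat + 1))) with h | h
    · rw [min_eq_left h, min_eq_left (by omega : pvMx (A.take Q.toNat) - c ≤ pvMx (A.drop (Q.toNat + 1)) - c)]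
    · rw [min_eq_right h, min_eq_right (by omega : pvMx (A.drop (Q.toNat + 1)) - c ≤ pvMx (A.take Q.toNat) - c)]

-- ===== VERDICT (by name: the statement is the Claim_ definition above) =====
theorem solution_spec : Claim_equal_solution := by
  unfold Claim_equal_solution
  intro A _
  unfold Spec_solution
  show solution A = solution_alt A
  simp only [solution, solution_alt, PySem.List.len_eq]
  by_cases h3 : (A.length : Int) < 3
  · rw [if_pos h3]
    rw [PySem.List.pyRange_one_eq_nil (by omega)]
    simp
  · rw [if_neg h3]
    rw [pv_foldl_append_if'
      (fun Q => (pvDropsL A Q).size > 0 ∧ (pvDropsR A Q).size > 0)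
      (fun Q => min ((PySem.List.max? (pvDropsL A Q).values (fun x => x)).getD 0)
                    ((PySem.List.max? (pvDropsR A Q).values (fun x => x)).getD 0))]
    rw [pv_foldl_if_max
      (fun Q => min (PySem.List.pyGetD (pvScanMax (PySem.List.pyGetD A 0 0) A) (Q-1) 0)
                    (PySem.List.pyGetD ((pvScanMax (PySem.List.pyGetD A (-1) 0) A.reverse).reverse) (Q+1) 0)
                  - PySem.List.pyGetD A Q 0 > 0)
      (fun Q => min (PySem.List.pyGetD (pvScanMax (PySem.List.pyGetD A 0 0) A) (Q-1) 0)
                    (PySem.List.pyGetD ((pvScanMax (PySem.List.pyGetD A (-1) 0) A.reverse).reverse) (Q+1) 0)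
                  - PySem.List.pyGetD A Q 0)]
    simp only [List.nil_append]
    -- the two per-Q lists agree
    have hfilter : (PySem.List.pyRange 1 ((A.length:Int)-1)).filter
          (fun Q => decide ((pvDropsL A Q).size > 0 ∧ (pvDropsR A Q).size > 0))
        = (PySem.List.pyRange 1 ((A.length:Int)-1)).filter
          (fun Q => decide (min (PySem.List.pyGetD (pvScanMax (PySem.List.pyGetD A 0 0) A) (Q-1) 0)
                    (PySem.List.pyGetD ((pvScanMax (PySem.List.pyGetD A (-1) 0) A.reverse).reverse) (Q+1) 0)
                  - PySem.List.pyGetD A Q 0 > 0)) := by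
      apply List.filter_congr
      intro Q hQ
      have hm := PySem.List.mem_pyRange_one.mp hQ
      have := (pv_perQ A Q (by omega) (by omega)).1
      simp only [decide_eq_decide]
      rw [this]
    rw [hfilter]
    have hmap : ((PySem.List.pyRange 1 ((A.length:Int)-1)).filter
          (fun Q => decide (min (PySem.List.pyGetD (pvScanMax (PySem.List.pyGetD A 0 0) A) (Q-1) 0)
                    (PySem.List.pyGetD ((pvScanMax (PySem.List.pyGetD A (-1) 0) A.reverse).reverse) (Q+1) 0)
                  - PySem.List.pyGetD A Q 0 > 0))).map
          (fun Q => min ((PySem.List.max? (pvDropsL A Q).values (fun x => x)).getD 0)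
                    ((PySem.List.max? (pvDropsR A Q).values (fun x => x)).getD 0))
        = ((PySem.List.pyRange 1 ((A.length:Int)-1)).filter
          (fun Q => decide (min (PySem.List.pyGetD (pvScanMax (PySem.List.pyGetD A 0 0) A) (Q-1) 0)
                    (PySem.List.pyGetD ((pvScanMax (PySem.List.pyGetD A (-1) 0) A.reverse).reverse) (Q+1) 0)
                  - PySem.List.pyGetD A Q 0 > 0))).map
          (fun Q => min (PySem.List.pyGetD (pvScanMax (PySem.List.pyGetD A 0 0) A) (Q-1) 0)
                    (PySem.List.pyGetD ((pvScanMax (PySem.List.pyGetD A (-1) 0) A.reverse).reverse) (Q+1) 0)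
                  - PySem.List.pyGetD A Q 0) := by
      apply List.map_congr_left
      intro Q hQ
      have hmem := List.mem_of_mem_filter hQ
      have hm := PySem.List.mem_pyRange_one.mp hmem
      have hcond := (List.mem_filter.mp hQ).2
      simp only [decide_eq_true_eq] at hcond
      have hperQ := pv_perQ A Q (by omega) (by omega)
      exact hperQ.2 (hperQ.1.mpr (by omega))
    rw [hmap]
    apply pv_final
    intro x hx
    rcases List.mem_map.mp hx with ⟨Q, hQ, rfl⟩
    have hcond := (List.mem_filter.mp hQ).2
    simp only [decide_eq_true_eq] at hcond
    omega
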